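-- pv_equiv track=rewrite | github.com/calumroy/CANopen_socketCAN_Test | utils/can_utils/can_utils.py | encode_can_string_to_bytes
-- ===== SOURCE A (Python) =====
-- def encode_can_string_to_bytes(can_string: str) -> int:
--     """
--     Encode a string into an ASCII byte value.
--     Args:
--       can_string (string): A string to encode into a list of bytes.
--     Returns:
--       Int value representing the ASCII values of the chars in the string.
--     """
--     temp_list = []
--     for i in range(8):  # 8 bytes per CAN message. One byte per ASCII char.
--         if i < len(can_string):
--             t = ord(can_string[i])
--             temp_list.append(f'{t:x}')
--         else:
--             temp_list.append('00')
--     temp_str = ''.join(str(x) for x in temp_list)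
--     int_of_string = int(temp_str, 16)
--     return int_of_string
-- ===== SOURCE B (Python) =====
-- def encode_can_string_to_bytes(can_string: str) -> int:
--     """
--     Encode a string into an ASCII byte value.
--     Args:
--       can_string (string): A string to encode into a list of bytes.
--     Returns:
--       Int value representing the ASCII values of the chars in the string.
--     """
--     data = can_string[:8].encode('ascii')
--     data = data + b'\x00' * (8 - len(data))
--     return int.from_bytes(data, 'big')
-- ===== Notes on version B (the rewrite author's own statement) =====
-- stated objective: simpler
-- what changed: B packs the first 8 chars as a big-endian 8-byte integer via bytes + int.from_bytes instead of building a list of hex strings, joining and re-parsing with int(...,16).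
-- intended difference: On strings whose chars at positions 1-7 include one with code below 16 (tab/LF/CR in the domain), A returns a misaligned value because its unpadded hex formatting emits a single digit there (witness a-then-tab: 439382438645334016), while B returns the proper one-byte-per-char big-endian packing (6992119896469405696), the intended CAN 8-byte encoding. — e.g. on encode_can_string_to_bytes("a\t"): A returns 439382438645334016, B returns 6992119896469405696
import Mathlib
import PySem

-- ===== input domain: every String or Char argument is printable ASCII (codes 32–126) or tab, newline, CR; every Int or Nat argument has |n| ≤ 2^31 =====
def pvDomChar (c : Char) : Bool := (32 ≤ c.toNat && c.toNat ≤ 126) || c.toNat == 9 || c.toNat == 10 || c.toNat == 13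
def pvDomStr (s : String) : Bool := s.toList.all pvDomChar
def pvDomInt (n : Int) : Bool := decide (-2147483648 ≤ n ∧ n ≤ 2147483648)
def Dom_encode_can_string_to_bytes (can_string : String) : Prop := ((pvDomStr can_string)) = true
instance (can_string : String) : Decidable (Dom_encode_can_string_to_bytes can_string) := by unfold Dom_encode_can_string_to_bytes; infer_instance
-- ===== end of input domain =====

-- B packs the first 8 chars as one big-endian 8-byte integer (bytes + int.from_bytes) instead of
-- A's hex-string building + int(...,16) parse; A and B differ exactly where A's unpadded hex drops a nibble.

-- ===== PORT A =====

-- f'{n:x}' digit for 0 ≤ n < 16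
def hexDigitChar (n : Nat) : Char :=
  if n < 10 then Char.ofNat (48 + n) else Char.ofNat (87 + n)

-- f'{n:x}' (lowercase hex, no padding), exact for n ≥ 0; structural fuel (= n, always sufficient)
def hexCharsAux : Nat → Nat → List Char
  | 0, n => [hexDigitChar n]
  | fuel + 1, n =>
    if n < 16 then [hexDigitChar n]
    else hexCharsAux fuel (n / 16) ++ [hexDigitChar (n % 16)]

def hexChars (n : Nat) : List Char := hexCharsAux n n

-- value of one hex digit; int(s,16) only ever sees valid digits here, where this is exact
def hexVal (c : Char) : Int :=
  if 48 ≤ c.toNat ∧ c.toNat ≤ 57 then (c.toNat : Int) - 48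
  else if 97 ≤ c.toNat ∧ c.toNat ≤ 102 then (c.toNat : Int) - 87
  else (c.toNat : Int) - 55

-- int(s,16): exact port for the nonempty all-valid-hex strings A builds
def parseHex (cs : List Char) : Int :=
  cs.foldl (fun a c => a * 16 + hexVal c) 0

def encode_can_string_to_bytes (can_string : String) : Int :=
  let cs := can_string.toList
  let temp_list : List (List Char) :=
    (PySem.List.pyRange 0 8 1).foldl (fun acc i =>
      if i < (cs.length : Int) then
        -- can_string[i]: 0 ≤ i < len here, so getD i.toNat is exact
        acc ++ [hexChars (cs.getD i.toNat ' ').toNat]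
      else
        acc ++ [['0', '0']]) []
  let temp_str := temp_list.flatten
  parseHex temp_str

-- ===== PORT B =====
-- can_string[:8].encode('ascii') → the first 8 chars' codes; padding with b'\x00';
-- int.from_bytes(·,'big') → big-endian fold (exact on bytes)
def encode_can_string_to_bytes_alt (can_string : String) : Int :=
  let data : List Int := (can_string.toList.take 8).map (fun c => (c.toNat : Int))
  let padded := data ++ List.replicate (8 - data.length) 0
  padded.foldl (fun a b => a * 256 + b) 0

-- ===== PRECONDITION & SPEC =====
-- On strings whose chars at positions 1-7 include one with code < 16 (tab/LF/CR in the domain),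
-- A's unpadded f'{t:x}' emits a single hex digit and misaligns all earlier bytes, while B returns
-- the proper one-byte-per-char big-endian packing, the intended CAN 8-byte encoding.
def D_encode_can_string_to_bytes (can_string : String) : Prop :=
  ((can_string.toList.take 8).drop 1).any (fun c => decide (c.toNat < 16)) = true
instance (can_string : String) : Decidable (D_encode_can_string_to_bytes can_string) := by
  unfold D_encode_can_string_to_bytes; infer_instance

def Spec_encode_can_string_to_bytes (can_string : String) (out : Int) : Prop :=
  ¬ D_encode_can_string_to_bytes can_string → out = encode_can_string_to_bytes_alt can_string
instance (can_string : String) (out : Int) : Decidable (Spec_encode_can_string_to_bytes can_string out) := by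
  unfold Spec_encode_can_string_to_bytes; infer_instance

def pvDiffWitness_encode_can_string_to_bytes : String := "a\t"
def pvDiffWitnessOut_encode_can_string_to_bytes : Int × Int :=
  (439382438645334016, 6992119896469405696)

-- ===== CLAIM =====
def Claim_unchanged_encode_can_string_to_bytes : Prop :=
  ∀ (can_string : String), Dom_encode_can_string_to_bytes can_string →
    Spec_encode_can_string_to_bytes can_string (encode_can_string_to_bytes can_string)

def Claim_changed_encode_can_string_to_bytes : Prop :=
  Dom_encode_can_string_to_bytes (pvDiffWitness_encode_can_string_to_bytes) ∧
  D_encode_can_string_to_bytes (pvDiffWitness_encode_can_string_to_bytes) ∧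
  encode_can_string_to_bytes (pvDiffWitness_encode_can_string_to_bytes) = pvDiffWitnessOut_encode_can_string_to_bytes.1 ∧
  encode_can_string_to_bytes_alt (pvDiffWitness_encode_can_string_to_bytes) = pvDiffWitnessOut_encode_can_string_to_bytes.2 ∧
  pvDiffWitnessOut_encode_can_string_to_bytes.1 ≠ pvDiffWitnessOut_encode_can_string_to_bytes.2

def Claim_exact_encode_can_string_to_bytes : Prop :=
  ∀ (can_string : String), Dom_encode_can_string_to_bytes can_string →
    D_encode_can_string_to_bytes can_string →
    encode_can_string_to_bytes can_string ≠ encode_can_string_to_bytes_alt can_string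

-- ===== LEMMAS AND PROOFS =====

-- abbreviation for one int(·,16) accumulation step
def hstep (a : Int) (c : Char) : Int := a * 16 + hexVal c

-- A's effective per-char step (hex width 1 or 2)
def bstep (a : Int) (c : Char) : Int :=
  a * (if c.toNat < 16 then 16 else 256) + (c.toNat : Int)

-- B's per-byte step
def pstep (a : Int) (c : Char) : Int := a * 256 + (c.toNat : Int)

theorem hexVal_hexDigitChar (n : Nat) (h : n < 16) :
    hexVal (hexDigitChar n) = (n : Int) := by
  interval_cases n <;> decide

theorem hexCharsAux_small (f m : Nat) (h : m < 16) :
    hexCharsAux f m = [hexDigitChar m] := by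
  cases f <;> simp [hexCharsAux, h]

theorem foldl_hexChars (t : Nat) (h : t < 256) (a : Int) :
    (hexChars t).foldl hstep a = a * (if t < 16 then 16 else 256) + (t : Int) := by
  unfold hexChars
  by_cases h16 : t < 16
  · rw [hexCharsAux_small t t h16]
    simp [List.foldl, hstep, hexVal_hexDigitChar t h16, h16]
  · have hq : t / 16 < 16 := by omega
    obtain ⟨f, rfl⟩ : ∃ f, t = f + 1 := ⟨t - 1, by omega⟩
    rw [hexCharsAux, if_neg h16, hexCharsAux_small _ _ hq]
    simp only [if_neg h16, List.foldl_append, List.foldl]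
    simp only [hstep, hexVal_hexDigitChar _ hq, hexVal_hexDigitChar _ (Nat.mod_lt _ (by omega))]
    have ht : ((f + 1 : Nat) : Int) = 16 * ((f + 1) / 16 : Nat) + ((f + 1) % 16 : Nat) := by
      push_cast [Nat.div_add_mod]; omega
    rw [ht]; ring

theorem foldl_pad (a : Int) : (['0', '0'] : List Char).foldl hstep a = a * 256 := by
  simp only [List.foldl, hstep, show hexVal '0' = 0 from by decide]
  ring

-- the range-indexed loop of A equals the bstep-fold over the first 8 chars plus the '00' padding factor
theorem range_foldl_eq (cs : List Char) (n : Nat) (a : Int) :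
    (List.range n).foldl
      (fun a i => if i < cs.length then
          a * (if (cs.getD i ' ').toNat < 16 then 16 else 256) + ((cs.getD i ' ').toNat : Int)
        else a * 256) a
    = (cs.take n).foldl bstep a * (256 : Int) ^ (n - min cs.length n) := by
  induction n with
  | zero => simp
  | succ n ih =>
    rw [List.range_succ, List.foldl_append, ih]
    by_cases hlt : n < cs.length
    · have hmin : min cs.length n = n := by omega
      have hmin' : min cs.length (n + 1) = n + 1 := by omega
      have hget : cs.getD n ' ' = cs[n] := by
        simp [List.getD, List.getElem?_eq_getElem hlt]
      simp only [List.foldl, if_pos hlt, hmin, hmin', Nat.sub_self, pow_zero, mul_one,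
        List.take_add_one, List.getElem?_eq_getElem hlt, Option.toList_some, List.foldl_append,
        hget, bstep]
    · have hle : cs.length ≤ n := by omega
      have h1 : cs.take (n + 1) = cs := List.take_of_length_le (by omega)
      have h2 : cs.take n = cs := List.take_of_length_le hle
      have hmin : min cs.length n = cs.length := by omega
      have hmin' : min cs.length (n + 1) = cs.length := by omega
      simp only [List.foldl, if_neg hlt, h1, h2, hmin, hmin']
      have : n + 1 - cs.length = (n - cs.length) + 1 := by omega
      rw [this, pow_succ]; ring

theorem codes_lt (s : String) (hd : Dom_encode_can_string_to_bytes s) :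
    ∀ c ∈ s.toList, c.toNat < 256 := by
  intro c hm
  have := (List.all_eq_true.mp hd) c hm
  simp only [pvDomChar, Bool.or_eq_true, Bool.and_eq_true, decide_eq_true_eq,
    beq_iff_eq] at this
  omega

theorem codes_pos (s : String) (hd : Dom_encode_can_string_to_bytes s) :
    ∀ c ∈ s.toList, 1 ≤ c.toNat := by
  intro c hm
  have := (List.all_eq_true.mp hd) c hm
  simp only [pvDomChar, Bool.or_eq_true, Bool.and_eq_true, decide_eq_true_eq,
    beq_iff_eq] at this
  omega

-- A = bstep-fold over take 8, times the padding power
theorem portA_eq (s : String) (hd : Dom_encode_can_string_to_bytes s) :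
    encode_can_string_to_bytes s
      = (s.toList.take 8).foldl bstep 0 * (256 : Int) ^ (8 - min s.toList.length 8) := by
  have hc := codes_lt s hd
  unfold encode_can_string_to_bytes
  dsimp only
  set cs := s.toList with hcs
  have hbody : (fun (acc : List (List Char)) (i : Int) =>
      if i < (cs.length : Int) then acc ++ [hexChars (cs.getD i.toNat ' ').toNat]
      else acc ++ [['0', '0']])
      = fun acc i => acc ++ [if i < (cs.length : Int) then hexChars (cs.getD i.toNat ' ').toNat else ['0', '0']] := by
    funext acc i; split <;> rfl
  rw [hbody, PySem.List.foldl_append_singleton_eq_map, List.nil_append]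
  have hrange : PySem.List.pyRange 0 8 1 = (List.range 8).map Int.ofNat := by decide
  rw [hrange, List.map_map]
  rw [show ∀ l : List Char, parseHex l = l.foldl hstep 0 from fun _ => rfl]
  have hflat : ∀ (l : List Nat) (a : Int),
      ((l.map ((fun i => if i < (cs.length : Int) then hexChars (cs.getD i.toNat ' ').toNat else ['0', '0']) ∘ Int.ofNat)).flatten).foldl hstep a
      = l.foldl (fun a k =>
          if k < cs.length then
            a * (if (cs.getD k ' ').toNat < 16 then 16 else 256) + ((cs.getD k ' ').toNat : Int)
          else a * 256) a := by
    intro l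
    induction l with
    | nil => intro a; rfl
    | cons k l ih =>
      intro a
      simp only [List.map_cons, List.flatten_cons, List.foldl_append, List.foldl,
        Function.comp_apply]
      rw [ih]
      congr 1
      by_cases hk : k < cs.length
      · have hk' : (Int.ofNat k) < (cs.length : Int) := Int.ofNat_lt.mpr hk
        rw [if_pos hk', if_pos hk]
        have htn : (Int.ofNat k).toNat = k := rfl
        rw [htn]
        have hmem : cs.getD k ' ' ∈ cs := by
          have : cs.getD k ' ' = cs[k] := by
            simp [List.getD, List.getElem?_eq_getElem hk]
          rw [this]; exact List.getElem_mem hk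
        exact foldl_hexChars _ (hc _ hmem) a
      · have hk' : ¬ (Int.ofNat k) < (cs.length : Int) := fun h => hk (Int.ofNat_lt.mp h)
        rw [if_neg hk', if_neg hk]
        exact foldl_pad a
  rw [hflat (List.range 8) 0, range_foldl_eq cs 8 0]

-- B = pstep-fold over take 8, times the same padding power
theorem portB_eq (s : String) :
    encode_can_string_to_bytes_alt s
      = (s.toList.take 8).foldl pstep 0 * (256 : Int) ^ (8 - min s.toList.length 8) := by
  unfold encode_can_string_to_bytes_alt
  dsimp only
  rw [List.foldl_append]
  have hmap : ∀ (l : List Char) (a : Int),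
      (l.map (fun c => (c.toNat : Int))).foldl (fun a b => a * 256 + b) a = l.foldl pstep a := by
    intro l
    induction l with
    | nil => intro a; rfl
    | cons c l ih => intro a; simp only [List.map_cons, List.foldl]; exact ih _
  have hrep : ∀ (k : Nat) (a : Int),
      (List.replicate k (0 : Int)).foldl (fun a b => a * 256 + b) a = a * 256 ^ k := by
    intro k
    induction k with
    | zero => intro a; simp
    | succ k ih =>
      intro a
      rw [List.replicate_succ]
      simp only [List.foldl]
      rw [ih, pow_succ]
      ring
  rw [hrep, hmap]
  congr 2
  simp [List.length_take, Nat.min_comm]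

-- with a zero accumulator, the width of the first char does not matter
theorem heads_eq (c : Char) : bstep 0 c = pstep 0 c := by
  unfold bstep pstep; split <;> ring

theorem foldl_bp_eq (l : List Char) (a : Int) (h : ∀ c ∈ l, 16 ≤ c.toNat) :
    l.foldl bstep a = l.foldl pstep a := by
  induction l generalizing a with
  | nil => rfl
  | cons c l ih =>
    have hc : ¬ c.toNat < 16 := by have := h c (by simp); omega
    simp only [List.foldl]
    rw [show bstep a c = pstep a c from by unfold bstep pstep; rw [if_neg hc]]
    exact ih _ (fun d hd => h d (by simp [hd]))

-- strict comparison lemmas for the tight claim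
theorem foldl_bp_lt (l : List Char) (a a' : Int) (ha : 0 ≤ a) (h : a < a') :
    l.foldl bstep a < l.foldl pstep a' := by
  induction l generalizing a a' with
  | nil => exact h
  | cons c l ih =>
    simp only [List.foldl]
    apply ih
    · unfold bstep; split <;> positivity
    · unfold bstep pstep
      have h16 : a * (if c.toNat < 16 then 16 else 256) ≤ a * 256 := by
        split <;> nlinarith
      nlinarith

theorem foldl_small_lt (l : List Char) (a : Int) (ha : 1 ≤ a)
    (h : ∃ c ∈ l, c.toNat < 16) :
    l.foldl bstep a < l.foldl pstep a := by
  induction l generalizing a with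
  | nil => exact absurd h (by simp)
  | cons c l ih =>
    simp only [List.foldl]
    by_cases hc : c.toNat < 16
    · have hlt : bstep a c < pstep a c := by
        unfold bstep pstep; rw [if_pos hc]; nlinarith
      exact foldl_bp_lt l _ _ (by unfold bstep; rw [if_pos hc]; positivity) hlt
    · have heq : bstep a c = pstep a c := by unfold bstep pstep; rw [if_neg hc]
      rw [heq]
      rcases h with ⟨d, hd, hds⟩
      rw [List.mem_cons] at hd
      rcases hd with rfl | hd
      · omega
      · apply ih _ _ ⟨d, hd, hds⟩
        unfold pstep
        have : (0 : Int) ≤ (c.toNat : Int) := by positivity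
        nlinarith

-- ===== VERDICT =====
theorem encode_can_string_to_bytes_spec : Claim_unchanged_encode_can_string_to_bytes := by
  intro s hd hnD
  rw [portA_eq s hd, portB_eq s]
  congr 1
  unfold D_encode_can_string_to_bytes at hnD
  cases hh : s.toList.take 8 with
  | nil => simp
  | cons c l =>
    have hl : ∀ d ∈ l, 16 ≤ d.toNat := by
      intro d hdm
      by_contra hlt
      exact hnD (by
        rw [hh]
        simp only [List.drop_one, List.tail_cons, List.any_eq_true]
        exact ⟨d, hdm, by simp; omega⟩)
    simp only [List.foldl]
    rw [heads_eq]
    exact foldl_bp_eq l _ hl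

theorem encode_can_string_to_bytes_changed : Claim_changed_encode_can_string_to_bytes := by
  unfold Claim_changed_encode_can_string_to_bytes; decide

theorem encode_can_string_to_bytes_tight : Claim_exact_encode_can_string_to_bytes := by
  intro s hd hD
  rw [portA_eq s hd, portB_eq s]
  have hpos : (0 : Int) < (256 : Int) ^ (8 - min s.toList.length 8) := by positivity
  intro heq
  have hne : (s.toList.take 8).foldl bstep 0 = (s.toList.take 8).foldl pstep 0 :=
    mul_right_cancel₀ (by positivity) heq
  unfold D_encode_can_string_to_bytes at hD
  cases hh : s.toList.take 8 with
  | nil => rw [hh] at hD; simp at hD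
  | cons c l =>
    rw [hh] at hD hne
    simp only [List.drop_one, List.tail_cons, List.any_eq_true, decide_eq_true_eq] at hD
    simp only [List.foldl] at hne
    rw [heads_eq] at hne
    have hc1 : 1 ≤ c.toNat := by
      apply codes_pos s hd
      have : c ∈ s.toList.take 8 := by rw [hh]; simp
      exact List.mem_of_mem_take this
    have ha1 : (1 : Int) ≤ pstep 0 c := by
      unfold pstep
      have : (1 : Int) ≤ (c.toNat : Int) := by exact_mod_cast hc1
      linarith
    exact absurd hne (ne_of_lt (foldl_small_lt l _ ha1 hD))
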